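-- pv_equiv track=rewrite | github.com/Steve0465/godman-lab | libs/password_ingest.py | audit_strength
-- ===== SOURCE A (Python) =====
-- from typing import Any, Dict, Iterable, List, Sequence
--
-- def _count_types(password: str) -> int:
--     has_upper = any(c.isupper() for c in password)
--     has_lower = any(c.islower() for c in password)
--     has_digit = any(c.isdigit() for c in password)
--     has_special = any(not c.isalnum() for c in password)
--     return sum([has_upper, has_lower, has_digit, has_special])
--
-- def compute_strength(password: str) -> str:
--     """Classify password strength."""
--     length = len(password)
--     types = _count_types(password)
--     if length >= 12 and types >= 3:
--         return "strong"
--     if 8 <= length <= 12 and types >= 2: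
--         return "medium"
--     return "weak"
--
-- def audit_strength(entries: Iterable[Dict[str, Any]]) -> Dict[str, List[Dict[str, Any]]]:
--     """Group entries by strength classification."""
--     grouped = {"weak": [], "medium": [], "strong": []}
--     for entry in entries:
--         strength = entry.get("strength") or compute_strength(entry.get("password", ""))
--         enriched = dict(entry)
--         enriched["strength"] = strength
--         grouped[strength].append(enriched)
--     return grouped
-- ===== SOURCE B (Python) =====
-- def audit_strength(entries):
--     """Group entries by strength classification (single-pass classify + filter grouping)."""
--     def classify(pw):
--         up = lo = dg = sp = False
--         for c in pw:
--             if c.isupper():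
--                 up = True
--             elif c.islower():
--                 lo = True
--             elif c.isdigit():
--                 dg = True
--             elif not c.isalnum():
--                 sp = True
--         types = up + lo + dg + sp
--         n = len(pw)
--         if n >= 12 and types >= 3:
--             return "strong"
--         if 8 <= n <= 12 and types >= 2:
--             return "medium"
--         return "weak"
--
--     enriched = []
--     for entry in entries:
--         e = dict(entry)
--         e["strength"] = e.get("strength") or classify(e.get("password", ""))
--         enriched.append(e)
--     return {s: [e for e in enriched if e["strength"] == s]
--             for s in ("weak", "medium", "strong")}
-- ===== Notes on version B (the rewrite author's own statement) =====
-- stated objective: alternative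
-- what changed: B classifies each password in a single character pass with four flags (instead of four any() scans) and builds the grouping by mapping entries to enriched dicts once and then filtering that list per strength key, instead of A's single loop appending into a pre-built three-key dict.
import Mathlib
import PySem

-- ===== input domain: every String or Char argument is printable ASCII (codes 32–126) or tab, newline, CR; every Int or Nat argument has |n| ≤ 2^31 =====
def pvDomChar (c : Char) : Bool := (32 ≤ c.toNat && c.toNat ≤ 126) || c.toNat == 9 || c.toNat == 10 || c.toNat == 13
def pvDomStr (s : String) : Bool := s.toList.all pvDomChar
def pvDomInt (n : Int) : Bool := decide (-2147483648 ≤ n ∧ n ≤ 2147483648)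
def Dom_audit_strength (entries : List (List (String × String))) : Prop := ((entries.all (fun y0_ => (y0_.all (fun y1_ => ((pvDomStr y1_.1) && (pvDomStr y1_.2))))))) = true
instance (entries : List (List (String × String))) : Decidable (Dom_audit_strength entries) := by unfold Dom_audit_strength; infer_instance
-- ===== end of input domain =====

-- B restructures A in two ways (objective: alternative, same cost): one flag-updating
-- character pass replaces the four any() scans, and the grouping is built by enriching
-- all entries once and filtering that list per strength key instead of A's append loop
-- over a pre-built three-key dict.

-- ===== PORT A =====
def countTypes (password : List Char) : Int :=
  let has_upper := password.any (fun c => PySem.Chars.isupper c)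
  let has_lower := password.any (fun c => PySem.Chars.islower c)
  let has_digit := password.any (fun c => PySem.Chars.isdigit c)
  let has_special := password.any (fun c => !(PySem.Chars.isalnum c))
  ([has_upper, has_lower, has_digit, has_special].map (fun b => if b then (1 : Int) else 0)).sum

def compute_strength (password : String) : String :=
  let length : Int := PySem.Str.len password
  let types : Int := countTypes password.toList
  if length ≥ 12 ∧ types ≥ 3 then "strong"
  else if 8 ≤ length ∧ length ≤ 12 ∧ types ≥ 2 then "medium"
  else "weak"

-- the loop body of A: entry.get("strength") or …: "" and missing are falsy;
-- grouped[strength].append is Dict.modify (exact under Pre_).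
def groupStep (g : PySem.Dict String (List (List (String × String))))
    (entry : List (String × String)) : PySem.Dict String (List (List (String × String))) :=
  let d := PySem.Dict.ofList entry
  let s0 := d.getD "strength" ""
  let strength := if s0 = "" then compute_strength (d.getD "password" "") else s0
  let enriched := (d.insert "strength" strength).items
  g.modify strength [] (fun l => l ++ [enriched])

def audit_strength (entries : List (List (String × String))) : List (String × List (List (String × String))) :=
  let grouped := entries.foldl groupStep
    (PySem.Dict.ofList [("weak", ([] : List (List (String × String)))), ("medium", []), ("strong", [])])
  grouped.items

-- ===== PORT B =====
def classifyAlt (pw : String) : String :=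
  let fl := pw.toList.foldl (fun (f : Bool × Bool × Bool × Bool) c =>
      if PySem.Chars.isupper c then (true, f.2.1, f.2.2.1, f.2.2.2)
      else if PySem.Chars.islower c then (f.1, true, f.2.2.1, f.2.2.2)
      else if PySem.Chars.isdigit c then (f.1, f.2.1, true, f.2.2.2)
      else if !(PySem.Chars.isalnum c) then (f.1, f.2.1, f.2.2.1, true)
      else f) (false, false, false, false)
  let types : Int := (if fl.1 then 1 else 0) + (if fl.2.1 then 1 else 0)
      + (if fl.2.2.1 then 1 else 0) + (if fl.2.2.2 then 1 else 0)
  let n : Int := PySem.Str.len pw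
  if n ≥ 12 ∧ types ≥ 3 then "strong"
  else if 8 ≤ n ∧ n ≤ 12 ∧ types ≥ 2 then "medium"
  else "weak"

def enrichAlt (entry : List (String × String)) : List (String × String) :=
  let d := PySem.Dict.ofList entry
  let s0 := d.getD "strength" ""
  (d.insert "strength" (if s0 = "" then classifyAlt (d.getD "password" "") else s0)).items

def audit_strength_alt (entries : List (List (String × String))) : List (String × List (List (String × String))) :=
  let enriched := entries.map enrichAlt
  ["weak", "medium", "strong"].map (fun s =>
    (s, enriched.filter (fun e => (PySem.Dict.mk e).getD "strength" "" == s)))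

-- ===== PRECONDITION & SPEC =====
-- Pre_ excludes exactly the inputs where the Python A raises KeyError: an entry carrying an
-- explicit non-empty "strength" value outside the three grouping keys.
def Pre_audit_strength (entries : List (List (String × String))) : Prop :=
  ∀ e ∈ entries, (PySem.Dict.ofList e).getD "strength" "" ∈ ["", "weak", "medium", "strong"]
instance (entries : List (List (String × String))) : Decidable (Pre_audit_strength entries) := by
  unfold Pre_audit_strength; infer_instance

def pvWitness_audit_strength : (List (List (String × String))) :=
  [[("password", "Abc123!xyzxy")], [("password", "hi"), ("strength", "medium")], []]

def Spec_audit_strength (entries : List (List (String × String))) (out : List (String × List (List (String × String)))) : Prop := out = audit_strength_alt entries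
instance (entries : List (List (String × String))) (out : List (String × List (List (String × String)))) : Decidable (Spec_audit_strength entries out) := by unfold Spec_audit_strength; infer_instance

-- ===== CLAIM (what is proved, stated in full; the proofs are below) =====
def Claim_equal_audit_strength : Prop := ∀ (entries : List (List (String × String))), Dom_audit_strength entries → Pre_audit_strength entries → Spec_audit_strength entries (audit_strength entries)

-- ===== LEMMAS AND PROOFS =====

-- Each ASCII-range character sets at most one of the four flags, so one elif-chain step
-- ORs exactly the four per-character predicates into the accumulator.
lemma stepChar (u l d s : Bool) (c : Char) :
    (if PySem.Chars.isupper c then (true, l, d, s)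
     else if PySem.Chars.islower c then (u, true, d, s)
     else if PySem.Chars.isdigit c then (u, l, true, s)
     else if !(PySem.Chars.isalnum c) then (u, l, d, true)
     else (u, l, d, s))
    = (u || PySem.Chars.isupper c, l || PySem.Chars.islower c,
       d || PySem.Chars.isdigit c, s || !(PySem.Chars.isalnum c)) := by
  simp only [PySem.Chars.isalnum, PySem.Chars.isalpha, PySem.Chars.isupper,
    PySem.Chars.islower, PySem.Chars.isdigit, Char.le_def, UInt32.le_iff_toNat_le]
  split_ifs <;> simp_all <;> omega

lemma flagsFold (cs : List Char) (u l d s : Bool) :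
    cs.foldl (fun (f : Bool × Bool × Bool × Bool) c =>
      if PySem.Chars.isupper c then (true, f.2.1, f.2.2.1, f.2.2.2)
      else if PySem.Chars.islower c then (f.1, true, f.2.2.1, f.2.2.2)
      else if PySem.Chars.isdigit c then (f.1, f.2.1, true, f.2.2.2)
      else if !(PySem.Chars.isalnum c) then (f.1, f.2.1, f.2.2.1, true)
      else f) (u, l, d, s)
    = (u || cs.any (fun c => PySem.Chars.isupper c),
       l || cs.any (fun c => PySem.Chars.islower c),
       d || cs.any (fun c => PySem.Chars.isdigit c),
       s || cs.any (fun c => !(PySem.Chars.isalnum c))) := by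
  induction cs generalizing u l d s with
  | nil => simp
  | cons c cs ih =>
    simp only [List.foldl_cons, stepChar u l d s c, ih, List.any_cons]
    simp [Bool.or_assoc]

lemma classifyAlt_eq (pw : String) : classifyAlt pw = compute_strength pw := by
  unfold classifyAlt compute_strength countTypes
  rw [flagsFold]
  cases pw.toList.any (fun c => PySem.Chars.isupper c) <;>
    cases pw.toList.any (fun c => PySem.Chars.islower c) <;>
      cases pw.toList.any (fun c => PySem.Chars.isdigit c) <;>
        cases pw.toList.any (fun c => !(PySem.Chars.isalnum c)) <;> simp

-- The strength A computes and stores for an entry.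
def strengthOf (entry : List (String × String)) : String :=
  let d := PySem.Dict.ofList entry
  let s0 := d.getD "strength" ""
  if s0 = "" then compute_strength (d.getD "password" "") else s0

lemma compute_strength_mem (pw : String) :
    compute_strength pw ∈ ["weak", "medium", "strong"] := by
  unfold compute_strength
  dsimp only
  split_ifs <;> simp

lemma strengthOf_mem (e : List (String × String))
    (h : (PySem.Dict.ofList e).getD "strength" "" ∈ ["", "weak", "medium", "strong"]) :
    strengthOf e ∈ ["weak", "medium", "strong"] := by
  unfold strengthOf
  by_cases h0 : (PySem.Dict.ofList e).getD "strength" "" = ""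
  · simpa [h0] using compute_strength_mem ((PySem.Dict.ofList e).getD "password" "")
  · rw [if_neg h0]
    have h' : (PySem.Dict.ofList e).getD "strength" "" = "" ∨
        (PySem.Dict.ofList e).getD "strength" "" = "weak" ∨
        (PySem.Dict.ofList e).getD "strength" "" = "medium" ∨
        (PySem.Dict.ofList e).getD "strength" "" = "strong" := by simpa using h
    rcases h' with h1 | h1 | h1 | h1
    · exact absurd h1 h0
    all_goals simp [h1]

lemma enrichAlt_strength (entry : List (String × String)) :
    (PySem.Dict.mk (enrichAlt entry)).getD "strength" "" = strengthOf entry := by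
  simp only [enrichAlt, strengthOf, classifyAlt_eq]
  have : PySem.Dict.mk (((PySem.Dict.ofList entry).insert "strength"
      (if (PySem.Dict.ofList entry).getD "strength" "" = ""
       then compute_strength ((PySem.Dict.ofList entry).getD "password" "")
       else (PySem.Dict.ofList entry).getD "strength" "")).items)
      = (PySem.Dict.ofList entry).insert "strength"
      (if (PySem.Dict.ofList entry).getD "strength" "" = ""
       then compute_strength ((PySem.Dict.ofList entry).getD "password" "")
       else (PySem.Dict.ofList entry).getD "strength" "") := PySem.Dict.ext rfl
  rw [this, PySem.Dict.getD_insert_self]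

lemma stepA_eq (g : PySem.Dict String (List (List (String × String))))
    (e : List (String × String)) :
    groupStep g e = g.modify (strengthOf e) [] (fun l => l ++ [enrichAlt e]) := by
  simp only [groupStep, enrichAlt, strengthOf, classifyAlt_eq]

lemma modify_weak (ws ms ss : List (List (String × String))) (f) :
    (PySem.Dict.mk [("weak", ws), ("medium", ms), ("strong", ss)]).modify "weak" [] f
    = PySem.Dict.mk [("weak", f ws), ("medium", ms), ("strong", ss)] := by
  simp [PySem.Dict.modify, PySem.Dict.getD, PySem.Dict.get?, PySem.Dict.contains, PySem.Dict.insert]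

lemma modify_medium (ws ms ss : List (List (String × String))) (f) :
    (PySem.Dict.mk [("weak", ws), ("medium", ms), ("strong", ss)]).modify "medium" [] f
    = PySem.Dict.mk [("weak", ws), ("medium", f ms), ("strong", ss)] := by
  simp [PySem.Dict.modify, PySem.Dict.getD, PySem.Dict.get?, PySem.Dict.contains, PySem.Dict.insert]

lemma modify_strong (ws ms ss : List (List (String × String))) (f) :
    (PySem.Dict.mk [("weak", ws), ("medium", ms), ("strong", ss)]).modify "strong" [] f
    = PySem.Dict.mk [("weak", ws), ("medium", ms), ("strong", f ss)] := by
  simp [PySem.Dict.modify, PySem.Dict.getD, PySem.Dict.get?, PySem.Dict.contains, PySem.Dict.insert]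

lemma loop_inv (xs : List (List (String × String)))
    (h : ∀ e ∈ xs, strengthOf e ∈ ["weak", "medium", "strong"])
    (ws ms ss : List (List (String × String))) :
    (xs.foldl groupStep
      (PySem.Dict.mk [("weak", ws), ("medium", ms), ("strong", ss)])).items
    = [("weak", ws ++ (xs.map enrichAlt).filter
          (fun e => (PySem.Dict.mk e).getD "strength" "" == "weak")),
       ("medium", ms ++ (xs.map enrichAlt).filter
          (fun e => (PySem.Dict.mk e).getD "strength" "" == "medium")),
       ("strong", ss ++ (xs.map enrichAlt).filter
          (fun e => (PySem.Dict.mk e).getD "strength" "" == "strong"))] := by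
  induction xs generalizing ws ms ss with
  | nil => simp
  | cons e xs ih =>
    have he := h e (List.mem_cons_self ..)
    have hrest : ∀ e' ∈ xs, strengthOf e' ∈ ["weak", "medium", "strong"] :=
      fun e' he' => h e' (List.mem_cons_of_mem _ he')
    have hs := enrichAlt_strength e
    rw [List.foldl_cons, stepA_eq]
    have he' : strengthOf e = "weak" ∨ strengthOf e = "medium" ∨ strengthOf e = "strong" := by
      simpa using he
    rcases he' with h1 | h1 | h1
    · rw [h1, modify_weak, ih hrest]
      simp [hs, h1]
    · rw [h1, modify_medium, ih hrest]
      simp [hs, h1]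
    · rw [h1, modify_strong, ih hrest]
      simp [hs, h1]

-- ===== VERDICT (by name: the statement is the Claim_ definition above) =====
theorem audit_strength_spec : Claim_equal_audit_strength := by
  intro entries _ hpre
  unfold Spec_audit_strength audit_strength audit_strength_alt
  have hofl : PySem.Dict.ofList [("weak", ([] : List (List (String × String)))), ("medium", []), ("strong", [])]
      = PySem.Dict.mk [("weak", []), ("medium", []), ("strong", [])] := by rfl
  rw [hofl, loop_inv entries (fun e he => strengthOf_mem e (hpre e he))]
  simp
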